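-- pv_equiv track=rewrite | github.com/ML-GSAI/Concat-ID | train_concat-id_wan2.1.py | get_node_indices
-- ===== SOURCE A (Python) =====
-- def get_node_indices(num_nodes, num_gpus):
--     """
--     Creates ordered list of node indices for each process
--
--     Args
--         num_nodes: number of nodes
--         num_gpus: number of gpus per node
--     """
--     # convert to int incase we are using string environmental variables
--     num_nodes = int(num_nodes)
--     num_gpus = int(num_gpus)
--
--     node_indices = [0]
--     for i in range(1, num_nodes*num_gpus):
--         # use modulo to decide when to increment node index
--         increment = i % num_gpus == 0
--         node_indices += [node_indices[-1] + increment]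
--     # convert to string
--     return [ str(x) for x in node_indices ]
-- ===== SOURCE B (Python) =====
-- def get_node_indices(num_nodes, num_gpus):
--     """
--     Creates ordered list of node indices for each process
--
--     Args
--         num_nodes: number of nodes
--         num_gpus: number of gpus per node
--     """
--     # convert to int incase we are using string environmental variables
--     num_nodes = int(num_nodes)
--     num_gpus = int(num_gpus)
--
--     # process slot i runs on node i // num_gpus; slot 0 is always node 0
--     n = num_nodes * num_gpus
--     return ['0'] + [str(i // num_gpus) for i in range(1, n)]
-- ===== Notes on version B (the rewrite author's own statement) =====
-- stated objective: simpler
-- what changed: Replaces A's accumulator loop (append previous entry plus a modulo-test increment) with the closed form: slot i belongs to node i // num_gpus, emitted by a single comprehension after the fixed slot-0 entry.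
-- intended difference: When both counts are negative with product > 1 (nonsensical inputs no caller specifies), A's sign-insensitive modulo test yields increasing indices 0,0,...,k while B's direct floor quotient i // num_gpus yields negative indices; B's closed form is the straightforward meaning of 'node of slot i' and A's pattern there is an accident of its modulo test. — e.g. on get_node_indices(-2, -1): A returns ["0", "1"], B returns ["0", "-1"]
import Mathlib
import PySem

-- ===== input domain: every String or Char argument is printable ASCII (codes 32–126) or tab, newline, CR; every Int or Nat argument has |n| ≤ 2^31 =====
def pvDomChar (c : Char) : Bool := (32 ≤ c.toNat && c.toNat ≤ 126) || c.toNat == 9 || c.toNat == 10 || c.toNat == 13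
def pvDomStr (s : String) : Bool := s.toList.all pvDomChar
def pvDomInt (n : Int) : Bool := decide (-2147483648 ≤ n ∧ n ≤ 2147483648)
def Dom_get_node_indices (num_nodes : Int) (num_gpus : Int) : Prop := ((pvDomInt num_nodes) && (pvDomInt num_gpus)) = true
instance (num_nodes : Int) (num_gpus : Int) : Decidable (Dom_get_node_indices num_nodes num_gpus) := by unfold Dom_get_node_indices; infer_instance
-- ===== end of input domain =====

-- B replaces A's accumulator loop (increment the previous entry on a modulo hit) by the
-- closed form slot i ↦ i // num_gpus; objective: simpler. On both-negative inputs with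
-- product > 1 the two values differ (stated below as D_).

-- ===== PORT A =====
-- A's loop: node_indices starts as [0]; for i in range(1, num_nodes*num_gpus) it
-- appends node_indices[-1] + (i % num_gpus == 0).  node_indices[-1] is ported as
-- getLast?.getD 0 (the list is never empty, so the default is never used).
def get_node_indices (num_nodes : Int) (num_gpus : Int) : List String :=
  let node_indices : List Int := [0]
  let node_indices :=
    (PySem.List.pyRange 1 (num_nodes * num_gpus) 1).foldl
      (fun acc i =>
        let increment : Bool := PySem.Int.mod i num_gpus == 0
        acc ++ [acc.getLast?.getD 0 + (if increment then 1 else 0)])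
      node_indices
  node_indices.map PySem.Int.toStr

-- ===== PORT B =====
def get_node_indices_alt (num_nodes : Int) (num_gpus : Int) : List String :=
  let n := num_nodes * num_gpus
  ["0"] ++ (PySem.List.pyRange 1 n 1).map (fun i => PySem.Int.toStr (PySem.Int.floordiv i num_gpus))

-- ===== PRECONDITION & SPEC =====
-- When both counts are negative with product > 1 (nonsensical inputs no caller specifies),
-- A's sign-insensitive modulo test yields increasing indices 0,0,…,k while B's direct floor
-- quotient i // num_gpus yields negative indices; B's closed form is the straightforward
-- meaning of 'node of slot i' and A's pattern there is an accident of its modulo test.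
def D_get_node_indices (num_nodes : Int) (num_gpus : Int) : Prop :=
  num_nodes < 0 ∧ num_gpus < 0 ∧ 1 < num_nodes * num_gpus
instance (num_nodes : Int) (num_gpus : Int) : Decidable (D_get_node_indices num_nodes num_gpus) := by unfold D_get_node_indices; infer_instance

def Spec_get_node_indices (num_nodes : Int) (num_gpus : Int) (out : List String) : Prop := ¬ D_get_node_indices num_nodes num_gpus → out = get_node_indices_alt num_nodes num_gpus
instance (num_nodes : Int) (num_gpus : Int) (out : List String) : Decidable (Spec_get_node_indices num_nodes num_gpus out) := by unfold Spec_get_node_indices; infer_instance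

def pvDiffWitness_get_node_indices : Int × Int := (-2, -1)
def pvDiffWitnessOut_get_node_indices : (List String) × (List String) := (["0", "1"], ["0", "-1"])

-- ===== CLAIM (what is proved, stated in full; the proofs are below) =====
def Claim_unchanged_get_node_indices : Prop := ∀ (num_nodes : Int) (num_gpus : Int), Dom_get_node_indices num_nodes num_gpus → Spec_get_node_indices num_nodes num_gpus (get_node_indices num_nodes num_gpus)
def Claim_changed_get_node_indices : Prop := Dom_get_node_indices (pvDiffWitness_get_node_indices.1) (pvDiffWitness_get_node_indices.2) ∧ D_get_node_indices (pvDiffWitness_get_node_indices.1) (pvDiffWitness_get_node_indices.2) ∧ get_node_indices (pvDiffWitness_get_node_indices.1) (pvDiffWitness_get_node_indices.2) = pvDiffWitnessOut_get_node_indices.1 ∧ get_node_indices_alt (pvDiffWitness_get_node_indices.1) (pvDiffWitness_get_node_indices.2) = pvDiffWitnessOut_get_node_indices.2 ∧ pvDiffWitnessOut_get_node_indices.1 ≠ pvDiffWitnessOut_get_node_indices.2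
def Claim_exact_get_node_indices : Prop := ∀ (num_nodes : Int) (num_gpus : Int), Dom_get_node_indices num_nodes num_gpus → D_get_node_indices num_nodes num_gpus → get_node_indices num_nodes num_gpus ≠ get_node_indices_alt num_nodes num_gpus

-- ===== LEMMAS AND PROOFS =====

-- For a positive divisor, floor (= Euclidean) division steps by the 0/1 divisibility flag.
lemma step_div (g b : Int) (hg : 0 < g) :
    b / g = (b - 1) / g + (if b % g = 0 then 1 else 0) := by
  have h : g * ((b - 1) / g) + (b - 1) % g = b - 1 := (Int.ediv_add_emod (b - 1) g)
  have hr0 : 0 ≤ (b - 1) % g := Int.emod_nonneg _ hg.ne'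
  have hr1 : (b - 1) % g < g := Int.emod_lt_of_pos _ hg
  set q := (b - 1) / g with hq
  set r := (b - 1) % g with hrdef
  by_cases hc : r = g - 1
  · have hb : b = (q + 1) * g := by have : (q + 1) * g = g * q + g := by ring
                                    omega
    have hd : b / g = q + 1 := by rw [hb, Int.mul_ediv_cancel _ hg.ne']
    have hm : b % g = 0 := by rw [hb]; exact Int.mul_emod_left _ _
    simp [hd, hm]
  · have hb : b = q * g + (r + 1) := by have : q * g = g * q := mul_comm _ _
                                        omega
    have hlt : r + 1 < g := by omega
    have hd : b / g = q := by
      rw [hb, add_comm, Int.add_mul_ediv_right _ _ hg.ne',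
        Int.ediv_eq_zero_of_lt (by omega) hlt, zero_add]
    have hm : b % g = r + 1 := by
      rw [hb, add_comm, Int.add_mul_emod_self_right, Int.emod_eq_of_lt (by omega) hlt]
    rw [hd, hm, if_neg (by omega)]
    omega

-- For a positive divisor, A's increment test is plain divisibility.
lemma inc_iff (g i : Int) :
    PySem.Int.mod i g = 0 ↔ i % g = 0 := by
  rw [PySem.Int.mod_eq_zero_iff_dvd]
  exact ⟨Int.emod_eq_zero_of_dvd, Int.dvd_of_emod_eq_zero⟩

-- B's closed form satisfies A's accumulator recurrence (positive divisor).
lemma fd_step (g b : Int) (hg : 0 < g) :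
    PySem.Int.floordiv (b - 1) g + (if PySem.Int.mod b g = 0 then 1 else 0)
      = PySem.Int.floordiv b g := by
  rw [PySem.Int.floordiv_eq_ediv_of_pos hg, PySem.Int.floordiv_eq_ediv_of_pos hg,
    step_div g b hg]
  by_cases h : b % g = 0
  · rw [if_pos h, if_pos ((inc_iff g b).mpr h)]
  · rw [if_neg h, if_neg (fun hc => h ((inc_iff g b).mp hc))]

-- Loop invariant (positive divisor): after consuming range(1, b), A's accumulator is
-- 0 :: (B's mapped range), and its last element is (b-1) // g.
lemma loop_inv (g : Int) (hg : 0 < g) (b : Int) (hb : 1 ≤ b) :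
    (PySem.List.pyRange 1 b 1).foldl
      (fun acc i =>
        let increment : Bool := PySem.Int.mod i g == 0
        acc ++ [acc.getLast?.getD 0 + (if increment then 1 else 0)]) [0]
      = 0 :: (PySem.List.pyRange 1 b 1).map (fun i => PySem.Int.floordiv i g)
    ∧ (0 :: (PySem.List.pyRange 1 b 1).map
        (fun i => PySem.Int.floordiv i g)).getLast?.getD 0
      = PySem.Int.floordiv (b - 1) g := by
  induction b, hb using Int.le_induction with
  | base =>
      constructor
      · simp [PySem.List.pyRange_one_eq_nil (by omega : (1:Int) ≤ 1)]
      · simp [PySem.List.pyRange_one_eq_nil (by omega : (1:Int) ≤ 1),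
          PySem.Int.floordiv_eq_ediv_of_pos hg]
  | succ b hb ih =>
      obtain ⟨ih1, ih2⟩ := ih
      rw [PySem.List.pyRange_one_succ_right (by omega : (1:Int) ≤ b)]
      have hx : ∀ L : List Int, (0 :: L).getLast?.getD 0 +
          (if (PySem.Int.mod b g == 0) = true then (1:Int) else 0)
          = (0 :: L).getLast?.getD 0 + (if PySem.Int.mod b g = 0 then 1 else 0) := by
        intro L; by_cases h : PySem.Int.mod b g = 0 <;> simp [h]
      constructor
      · rw [List.foldl_append, ih1]
        simp only [List.foldl_cons, List.foldl_nil, List.map_append, List.map_cons,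
          List.map_nil, List.cons_append]
        congr 1
        rw [hx, ih2, fd_step g b hg]
      · simp only [List.map_append, List.map_cons, List.map_nil, add_sub_cancel_right]
        rw [← List.cons_append, List.getLast?_concat]
        rfl

-- A's foldl step only appends: the accumulator stays a prefix of the result.
lemma foldl_append_prefix (f : List Int → Int → Int) (l : List Int) (acc : List Int) :
    ∃ rest, l.foldl (fun a i => a ++ [f a i]) acc = acc ++ rest := by
  induction l generalizing acc with
  | nil => exact ⟨[], by simp⟩
  | cons x xs ih =>
      obtain ⟨r, hr⟩ := ih (acc ++ [f acc x])
      exact ⟨[f acc x] ++ r, by simp [hr]⟩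

-- 1 // g = -1 for a negative divisor g.
lemma one_floordiv_neg (g : Int) (hg : g < 0) : PySem.Int.floordiv 1 g = -1 := by
  have hfd : PySem.Int.floordiv 1 g = Int.fdiv 1 g := rfl
  rw [hfd, Int.fdiv_eq_ediv]
  by_cases h1 : g = -1
  · subst h1; decide
  · have hnd : ¬(0 ≤ g ∨ g ∣ 1) := by
      rintro (h2 | h2)
      · omega
      · rcases Int.isUnit_iff.mp (isUnit_of_dvd_one h2) with h3 | h3 <;> omega
    rw [if_neg hnd]
    have hneg : 1 / g = -(1 / (-g)) := by rw [← Int.ediv_neg, neg_neg]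
    have hz : 1 / (-g) = 0 := Int.ediv_eq_zero_of_lt (by omega) (by omega)
    rw [hneg, hz]
    ring

-- With at least two slots, A's accumulator starts with [0, (1 % ng == 0)] and only grows.
lemma a_shape (ng N : Int) (h2 : 2 ≤ N) :
    ∃ rest : List Int,
      (PySem.List.pyRange 1 N 1).foldl
        (fun acc i =>
          let increment : Bool := PySem.Int.mod i ng == 0
          acc ++ [acc.getLast?.getD 0 + (if increment then 1 else 0)]) [0]
      = [0, if (PySem.Int.mod 1 ng == 0) = true then 1 else 0] ++ rest := by
  rw [PySem.List.pyRange_one_cons (by omega : (1:Int) < N)]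
  show ∃ rest, (PySem.List.pyRange 2 N 1).foldl
      (fun acc i => acc ++ [acc.getLast?.getD 0 +
        (if (PySem.Int.mod i ng == 0) = true then 1 else 0)])
      ([0] ++ [(0:Int) + (if (PySem.Int.mod 1 ng == 0) = true then 1 else 0)]) = _
  obtain ⟨rest, hr⟩ := foldl_append_prefix
    (fun a i => a.getLast?.getD 0 + (if (PySem.Int.mod i ng == 0) = true then (1:Int) else 0))
    (PySem.List.pyRange 2 N 1)
    ([0] ++ [(0:Int) + (if (PySem.Int.mod 1 ng == 0) = true then 1 else 0)])
  exact ⟨rest, by rw [hr]; simp⟩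

theorem get_node_indices_spec : Claim_unchanged_get_node_indices := by
  intro num_nodes num_gpus _ hnd
  unfold get_node_indices get_node_indices_alt
  by_cases hn : num_nodes * num_gpus ≤ 1
  · simp [PySem.List.pyRange_one_eq_nil hn]
    decide
  · have hb : 1 ≤ num_nodes * num_gpus := by omega
    have hg : 0 < num_gpus := by
      by_contra hle
      push_neg at hle
      have h0 : num_gpus ≠ 0 := by
        intro h0; rw [h0, mul_zero] at hn; omega
      have hglt : num_gpus < 0 := by omega
      have hnn : num_nodes < 0 := by
        by_contra h2
        push_neg at h2
        have := mul_nonpos_of_nonneg_of_nonpos h2 hglt.le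
        omega
      exact hnd ⟨hnn, hglt, by omega⟩
    have h := (loop_inv num_gpus hg (num_nodes * num_gpus) hb).1
    simp only [h, List.map_cons, List.map_map]
    congr 1

theorem get_node_indices_changed : Claim_changed_get_node_indices := by
  unfold Claim_changed_get_node_indices; decide

theorem get_node_indices_tight : Claim_exact_get_node_indices := by
  intro num_nodes num_gpus _ hD heq
  obtain ⟨hn, hg, hp⟩ := hD
  have h2 : 2 ≤ num_nodes * num_gpus := by omega
  simp only [get_node_indices, get_node_indices_alt] at heq
  obtain ⟨rest, hr⟩ := a_shape num_gpus (num_nodes * num_gpus) h2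
  rw [hr, PySem.List.pyRange_one_cons (by omega : (1:Int) < num_nodes * num_gpus)] at heq
  simp only [List.cons_append, List.nil_append, List.map_cons] at heq
  obtain ⟨-, heq2⟩ := List.cons_eq_cons.mp heq
  obtain ⟨hsec, -⟩ := List.cons_eq_cons.mp heq2
  rw [one_floordiv_neg num_gpus hg] at hsec
  by_cases hc : (PySem.Int.mod 1 num_gpus == 0) = true
  · rw [if_pos hc] at hsec; exact absurd hsec (by decide)
  · rw [if_neg hc] at hsec; exact absurd hsec (by decide)
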